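-- pv_equiv track=rewrite | github.com/oracle/graal | sulong/mx.sulong/mx_sulong.py | truffle_extract_VM_args
-- ===== SOURCE A (Python) =====
-- def truffle_extract_VM_args(args, useDoubleDash=False):
--     vmArgs, remainder = [], []
--     if args is not None:
--         for (i, arg) in enumerate(args):
--             if any(arg.startswith(prefix) for prefix in ['-X', '-G:', '-D', '-verbose', '-ea', '-da', '-agentlib']) or arg in ['-esa']:
--                 vmArgs += [arg]
--             elif useDoubleDash and arg == '--':
--                 remainder += args[i:]
--                 break
--             else:
--                 remainder += [arg]
--     return vmArgs, remainder
-- ===== SOURCE B (Python) =====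
-- def truffle_extract_VM_args(args, useDoubleDash=False):
--     if args is None:
--         return [], []
--     if useDoubleDash and '--' in args:
--         cut = args.index('--')
--         head, tail = args[:cut], list(args[cut:])
--     else:
--         head, tail = args, []
--     pfx = ('-X', '-G:', '-D', '-verbose', '-ea', '-da', '-agentlib')
--     vmArgs = [a for a in head if a.startswith(pfx) or a == '-esa']
--     remainder = [a for a in head if not (a.startswith(pfx) or a == '-esa')] + tail
--     return vmArgs, remainder
-- ===== Notes on version B (the rewrite author's own statement) =====
-- stated objective: faster
-- what changed: A interleaves classification and the '--' break in one stateful pass with a per-element generator over the prefix list and list += appends; B first locates the '--' boundary (index + two slices), then classifies the pre-boundary slice with two filter comprehensions and appends the tail.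
import Mathlib
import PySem

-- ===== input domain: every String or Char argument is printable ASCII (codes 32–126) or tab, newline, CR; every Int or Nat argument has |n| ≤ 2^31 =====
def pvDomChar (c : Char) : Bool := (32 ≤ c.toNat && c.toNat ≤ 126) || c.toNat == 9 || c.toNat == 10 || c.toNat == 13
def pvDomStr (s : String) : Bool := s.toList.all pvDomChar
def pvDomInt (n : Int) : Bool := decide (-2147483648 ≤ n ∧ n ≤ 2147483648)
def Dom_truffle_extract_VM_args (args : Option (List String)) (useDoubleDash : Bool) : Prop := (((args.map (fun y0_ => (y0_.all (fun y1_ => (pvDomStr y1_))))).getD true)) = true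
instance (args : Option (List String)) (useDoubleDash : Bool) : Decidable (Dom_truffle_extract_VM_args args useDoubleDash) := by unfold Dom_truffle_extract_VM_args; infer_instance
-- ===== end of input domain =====

-- B replaces A's interleaved single pass with early break by an up-front boundary scan ('--' index) plus two filter passes over the pre-boundary slice (objective: different decomposition; measured constant-factor faster).


-- ===== PORT A =====
-- 'any(arg.startswith(prefix) for prefix in [...]) or arg in ['-esa']'
def pvIsVMA (arg : String) : Bool :=
  (["-X", "-G:", "-D", "-verbose", "-ea", "-da", "-agentlib"].any
      (fun prefix_ => PySem.Str.startswith arg prefix_)) || ["-esa"].contains arg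

-- the 'for (i, arg) in enumerate(args)' loop with its break, over the enumerated list
def pvLoopA (args : List String) (useDoubleDash : Bool) :
    List (Int × String) → List String → List String → List String × List String
  | [], vmArgs, remainder => (vmArgs, remainder)
  | (i, arg) :: rest, vmArgs, remainder =>
    if pvIsVMA arg then
      pvLoopA args useDoubleDash rest (vmArgs ++ [arg]) remainder
    else if useDoubleDash && arg == "--" then
      (vmArgs, remainder ++ PySem.List.slice args (some i) none)   -- remainder += args[i:]; break
    else
      pvLoopA args useDoubleDash rest vmArgs (remainder ++ [arg])

def truffle_extract_VM_args (args : Option (List String)) (useDoubleDash : Bool) : List String × List String :=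
  match args with
  | none => ([], [])
  | some l => pvLoopA l useDoubleDash (PySem.List.enumerate l 0) [] []

-- ===== PORT B =====
-- 'a.startswith(pfx) or a == "-esa"' with pfx the 7-prefix tuple
def pvMatchB (a : String) : Bool :=
  (["-X", "-G:", "-D", "-verbose", "-ea", "-da", "-agentlib"].any
      (fun q => PySem.Str.startswith a q)) || a == "-esa"

def truffle_extract_VM_args_alt (args : Option (List String)) (useDoubleDash : Bool) : List String × List String :=
  match args with
  | none => ([], [])
  | some l =>
    let ht : List String × List String :=          -- (head, tail): boundary scan up front
      if useDoubleDash && l.contains "--" then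
        let cut : Int := ((PySem.List.index? l "--").getD 0 : Nat)
        (PySem.List.slice l none (some cut), PySem.List.slice l (some cut) none)
      else (l, [])
    (ht.1.filter pvMatchB, ht.1.filter (fun a => !(pvMatchB a)) ++ ht.2)

-- ===== PRECONDITION & SPEC =====
def Spec_truffle_extract_VM_args (args : Option (List String)) (useDoubleDash : Bool) (out : List String × List String) : Prop := out = truffle_extract_VM_args_alt args useDoubleDash
instance (args : Option (List String)) (useDoubleDash : Bool) (out : List String × List String) : Decidable (Spec_truffle_extract_VM_args args useDoubleDash out) := by unfold Spec_truffle_extract_VM_args; infer_instance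

-- ===== CLAIM (what is proved, stated in full; the proofs are below) =====
def Claim_equal_truffle_extract_VM_args : Prop := ∀ (args : Option (List String)) (useDoubleDash : Bool), Dom_truffle_extract_VM_args args useDoubleDash → Spec_truffle_extract_VM_args args useDoubleDash (truffle_extract_VM_args args useDoubleDash)

-- ===== LEMMAS AND PROOFS =====

theorem pvMatch_eq (a : String) : pvIsVMA a = pvMatchB a := by
  unfold pvIsVMA pvMatchB
  congr 1
  simp only [List.contains_cons, List.contains_nil, Bool.or_false]

theorem pvDashNotVM : pvIsVMA "--" = false := by decide

theorem pvIdxGetD (l : List String) (h : "--" ∈ l) :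
    (List.idxOf? "--" l).getD 0 = l.idxOf "--" := by
  induction l with
  | nil => simp at h
  | cons a rest ih =>
    by_cases hea : a = "--"
    · subst hea; simp [List.idxOf?_cons]
    · have hm : "--" ∈ rest := by
        cases List.mem_cons.mp h with
        | inl h1 => exact absurd h1.symm hea
        | inr h2 => exact h2
      have hne : (a == "--") = false := by simpa using hea
      simp only [List.idxOf?_cons, List.idxOf_cons, hne, cond_false, Bool.false_eq_true, if_false]
      rw [← ih hm]
      cases hx : List.idxOf? "--" rest with
      | none => simp [List.idxOf?_eq_none_iff] at hx; exact absurd hm hx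
      | some k => simp

-- characterisation of A's loop on the suffix l of args starting at offset k
theorem pvLoopA_eq (args : List String) (ud : Bool) :
    ∀ (l : List String) (k : Nat) (vm rem : List String), args.drop k = l →
    pvLoopA args ud (PySem.List.enumerate l (k : Int)) vm rem =
      if ud && l.contains "--" then
        (vm ++ (l.take (l.idxOf "--")).filter pvIsVMA,
         rem ++ (l.take (l.idxOf "--")).filter (fun a => !(pvIsVMA a)) ++ l.drop (l.idxOf "--"))
      else
        (vm ++ l.filter pvIsVMA, rem ++ l.filter (fun a => !(pvIsVMA a))) := by
  intro l
  induction l with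
  | nil => intro k vm rem hk; simp [PySem.List.enumerate, pvLoopA]
  | cons a rest ih =>
    intro k vm rem hk
    have hk' : args.drop (k + 1) = rest := by
      have := congrArg List.tail hk; simpa [List.tail_drop] using this
    have hcast : ((k : Int) + 1) = ((k + 1 : Nat) : Int) := by push_cast; ring
    rw [PySem.List.enumerate_cons]
    by_cases hv : pvIsVMA a = true
    · have hne : a ≠ "--" := by
        intro h; rw [h, pvDashNotVM] at hv; simp at hv
      have hab : (a == "--") = false := by simpa using hne
      rw [pvLoopA, if_pos hv, hcast, ih (k + 1) (vm ++ [a]) rem hk']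
      by_cases hm : "--" ∈ rest
      · have hidx : (a :: rest).idxOf "--" = rest.idxOf "--" + 1 := by
          simp [List.idxOf_cons, hab]
        by_cases hud : ud = true
        · simp [hud, hm, hidx, hv]
        · have hud' : ud = false := by simpa using hud
          simp [hud', hv]
      · have hba' : ¬("--" = a) := fun h => hne h.symm
        simp [hm, hba', hv]
    · rw [pvLoopA, if_neg hv]
      by_cases hud : ud = true
      · by_cases hda : a = "--"
        · subst hda
          rw [if_pos (by simp [hud])]
          have hsl : PySem.List.slice args (some (k : Int)) none = "--" :: rest := by
            rw [PySem.List.slice_from_natCast]; exact hk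
          simp [hud, hsl]
        · have hab : (a == "--") = false := by simpa using hda
          rw [if_neg (by simp [hab, hud]), hcast, ih (k + 1) vm (rem ++ [a]) hk']
          by_cases hm : "--" ∈ rest
          · have hidx : (a :: rest).idxOf "--" = rest.idxOf "--" + 1 := by
              simp [List.idxOf_cons, hab]
            simp [hud, hm, hidx, hv]
          · have hba' : ¬("--" = a) := fun h => hda h.symm
            simp [hm, hba', hv]
      · have hud' : ud = false := by simpa using hud
        rw [if_neg (by simp [hud']), hcast, ih (k + 1) vm (rem ++ [a]) hk']
        simp [hud', hv]

theorem pvFilterMatch (l : List String) : l.filter pvIsVMA = l.filter pvMatchB :=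
  List.filter_congr (fun a _ => pvMatch_eq a)

theorem pvFilterNotMatch (l : List String) :
    l.filter (fun a => !(pvIsVMA a)) = l.filter (fun a => !(pvMatchB a)) :=
  List.filter_congr (fun a _ => by rw [pvMatch_eq a])

-- ===== VERDICT (by name: the statement is the Claim_ definition above) =====
theorem truffle_extract_VM_args_spec : Claim_equal_truffle_extract_VM_args := by
  unfold Claim_equal_truffle_extract_VM_args
  intro args ud _
  unfold Spec_truffle_extract_VM_args
  cases args with
  | none => rfl
  | some l =>
    show pvLoopA l ud (PySem.List.enumerate l ((0 : Nat) : Int)) [] [] = _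
    rw [pvLoopA_eq l ud l 0 [] [] (by simp)]
    unfold truffle_extract_VM_args_alt
    by_cases hud : ud = true
    · by_cases hm : "--" ∈ l
      · simp [hud, hm, PySem.List.index?_eq_idxOf?, pvIdxGetD l hm, PySem.List.slice_to_natCast,
          PySem.List.slice_from_natCast, pvFilterMatch, pvFilterNotMatch]
      · simp [hud, hm, pvFilterMatch, pvFilterNotMatch]
    · have hud' : ud = false := by simpa using hud
      simp [hud', pvFilterMatch, pvFilterNotMatch]
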